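-- pv_equiv track=rewrite | github.com/Pirog17000/Pirogs-Nodes | nodes.py | _find_model
-- ===== SOURCE A (Python) =====
-- def _find_model(model_name, available_models):
--     """Find model by name (exact or partial match)"""
--     # Find exact match first
--     for model in available_models:
--         if model == model_name:
--             return model
--
--     # Find partial match
--     for model in available_models:
--         if model_name.lower() in model.lower():
--             return model
--
--     return None
-- ===== SOURCE B (Python) =====
-- def _find_model(model_name, available_models):
--     """Find model by name (exact or partial match)"""
--     needle = model_name.lower()
--     partial = None
--     for model in available_models:
--         if model == model_name:
--             return model
--         if partial is None and needle in model.lower():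
--             partial = model
--     return partial
-- ===== Notes on version B (the rewrite author's own statement) =====
-- stated objective: faster
-- what changed: A scans the list twice (first for an exact match, then for a partial one) and recomputes model_name.lower() on every iteration; B makes a single pass keeping the first partial match in an accumulator, returning immediately on an exact match, with the needle lowercased once.
import Mathlib
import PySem

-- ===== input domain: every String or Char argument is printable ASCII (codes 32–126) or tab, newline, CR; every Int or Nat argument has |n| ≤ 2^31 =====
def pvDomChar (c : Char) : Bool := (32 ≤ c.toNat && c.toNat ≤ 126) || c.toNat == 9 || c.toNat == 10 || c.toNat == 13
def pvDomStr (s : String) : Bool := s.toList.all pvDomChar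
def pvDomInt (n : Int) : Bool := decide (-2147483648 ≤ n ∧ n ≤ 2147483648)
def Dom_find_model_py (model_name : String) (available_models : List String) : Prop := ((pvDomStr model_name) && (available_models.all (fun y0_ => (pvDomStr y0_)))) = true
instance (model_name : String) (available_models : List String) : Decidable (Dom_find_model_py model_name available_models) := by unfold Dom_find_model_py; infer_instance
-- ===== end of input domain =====

-- B makes one pass with a first-partial accumulator instead of A's two scans; same results, proved equal.

-- ===== PORT A =====
-- first loop of A: first exact match
def pvFindExact (model_name : String) : List String → Option String
  | [] => none
  | m :: rest => if m == model_name then some m else pvFindExact model_name rest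

-- second loop of A: first partial match (model_name.lower() in model.lower())
def pvFindPartial (model_name : String) : List String → Option String
  | [] => none
  | m :: rest =>
      if PySem.Str.isIn (PySem.Str.lower model_name) (PySem.Str.lower m) then some m
      else pvFindPartial model_name rest

def find_model_py (model_name : String) (available_models : List String) : Option String :=
  match pvFindExact model_name available_models with
  | some m => some m
  | none => pvFindPartial model_name available_models

-- ===== PORT B =====
-- single pass: return on exact match, record first partial match in the accumulator
def pvAltLoop (model_name needle : String) (part : Option String) : List String → Option String
  | [] => part
  | m :: rest =>
      if m == model_name then some m
      else
        pvAltLoop model_name needle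
          (match part with
           | none => if PySem.Str.isIn needle (PySem.Str.lower m) then some m else none
           | some p => some p) rest

def find_model_py_alt (model_name : String) (available_models : List String) : Option String :=
  pvAltLoop model_name (PySem.Str.lower model_name) none available_models

-- ===== PRECONDITION & SPEC =====
def Spec_find_model_py (model_name : String) (available_models : List String) (out : Option String) : Prop := out = find_model_py_alt model_name available_models
instance (model_name : String) (available_models : List String) (out : Option String) : Decidable (Spec_find_model_py model_name available_models out) := by unfold Spec_find_model_py; infer_instance

-- ===== CLAIM (what is proved, stated in full; the proofs are below) =====
def Claim_equal_find_model_py : Prop := ∀ (model_name : String) (available_models : List String), Dom_find_model_py model_name available_models → Spec_find_model_py model_name available_models (find_model_py model_name available_models)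

-- ===== LEMMAS AND PROOFS =====
-- loop invariant: B's single pass equals "first exact, else accumulator, else first partial"
theorem pvAltLoop_eq (model_name : String) (ms : List String) :
    ∀ part : Option String,
      pvAltLoop model_name (PySem.Str.lower model_name) part ms =
        match pvFindExact model_name ms with
        | some m => some m
        | none =>
            match part with
            | some p => some p
            | none => pvFindPartial model_name ms := by
  induction ms with
  | nil => intro part; cases part <;> simp [pvAltLoop, pvFindExact, pvFindPartial]
  | cons m rest ih =>
    intro part
    by_cases hx : m == model_name
    · simp [pvAltLoop, pvFindExact, hx]
    · cases part with
      | some p =>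
        simp only [pvAltLoop, pvFindExact, hx, ih]
        cases pvFindExact model_name rest <;> simp
      | none =>
        by_cases hp : PySem.Str.isIn (PySem.Str.lower model_name) (PySem.Str.lower m)
        · simp only [pvAltLoop, pvFindExact, pvFindPartial, hx, hp, ih]
          cases pvFindExact model_name rest <;> simp
        · simp only [pvAltLoop, pvFindExact, pvFindPartial, hx, hp, ih]
          cases pvFindExact model_name rest <;> simp

-- ===== VERDICT (by name: the statement is the Claim_ definition above) =====
theorem find_model_py_spec : Claim_equal_find_model_py := by
  intro model_name available_models _
  unfold Spec_find_model_py find_model_py find_model_py_alt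
  rw [pvAltLoop_eq]
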